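-- pv_equiv track=rewrite | github.com/RangelGasharov/python-basics | algorithms/leetcode_find_all_people_with_secret.py | find_all_people
-- ===== SOURCE A (Python) =====
-- from collections import defaultdict, deque
--
-- def find_all_people(n: int, meetings: list[list[int]], first_person: int) -> list[int]:
--     time_meetings = defaultdict(list)
--     for x, y, t in meetings:
--         time_meetings[t].append((x, y))
--
--     knows_secret = [False] * n
--     knows_secret[0] = True
--     knows_secret[first_person] = True
--
--     for t in sorted(time_meetings.keys()):
--         meetings = time_meetings[t]
--
--         meet_list = defaultdict(list)
--         for x, y in meetings:
--             meet_list[x].append(y)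
--             meet_list[y].append(x)
--
--         start = set()
--         for x, y in meetings:
--             if knows_secret[x]:
--                 start.add(x)
--             if knows_secret[y]:
--                 start.add(y)
--
--         q = deque(start)
--         while q:
--             person = q.popleft()
--             for next_person in meet_list[person]:
--                 if not knows_secret[next_person]:
--                     knows_secret[next_person] = True
--                     q.append(next_person)
--
--     return [i for i in range(n) if knows_secret[i]]
-- ===== SOURCE B (Python) =====
-- def find_all_people(n: int, meetings: list[list[int]], first_person: int) -> list[int]:
--     knows = [False] * n
--     knows[0] = True
--     knows[first_person] = True
--
--     for t in sorted({m[2] for m in meetings}):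
--         pairs = [(m[0], m[1]) for m in meetings if m[2] == t]
--         changed = True
--         while changed:
--             changed = False
--             for x, y in pairs:
--                 if knows[x] != knows[y]:
--                     knows[x] = knows[y] = True
--                     changed = True
--
--     return [k for k, v in enumerate(knows) if v]
-- ===== Notes on version B (the rewrite author's own statement) =====
-- stated objective: simpler
-- what changed: A buckets meetings into a defaultdict by time and per time builds an adjacency defaultdict, a start set and runs a deque BFS; B has none of those structures: it iterates the sorted distinct times, filters that time's (x,y) pairs straight out of the meeting list, and saturates the knows-marks by re-scanning the pairs until a pass changes nothing.
-- outside the precondition, e.g. on find_all_people(3, [[-2, 2, 1], [0, 1, 1]], 0): A returns [0, 1], B returns [0, 1, 2]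
import Mathlib
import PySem

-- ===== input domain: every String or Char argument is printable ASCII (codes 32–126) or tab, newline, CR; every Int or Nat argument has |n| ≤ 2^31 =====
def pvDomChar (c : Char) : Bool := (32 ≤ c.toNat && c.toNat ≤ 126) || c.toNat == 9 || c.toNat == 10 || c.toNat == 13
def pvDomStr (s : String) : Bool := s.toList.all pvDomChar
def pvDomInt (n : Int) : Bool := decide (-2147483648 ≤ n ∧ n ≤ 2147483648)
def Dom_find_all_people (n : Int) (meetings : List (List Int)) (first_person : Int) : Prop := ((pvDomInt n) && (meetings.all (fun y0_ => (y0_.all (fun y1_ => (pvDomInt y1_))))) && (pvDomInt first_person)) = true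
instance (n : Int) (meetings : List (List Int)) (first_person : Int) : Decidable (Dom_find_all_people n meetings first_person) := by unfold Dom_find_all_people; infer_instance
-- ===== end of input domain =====

-- B drops A's data structures entirely (no time defaultdict, no adjacency defaultdict, no start
-- set, no deque BFS): it walks the sorted distinct times, filters each time's pairs straight out
-- of the meeting list, and saturates the marks by re-scanning those pairs until a pass changes
-- nothing ("simpler", not faster).

-- ===== PORT A =====
-- time_meetings = defaultdict(list); time_meetings[t].append((x, y))
def pvBuckets (meetings : List (List Int)) : PySem.Dict Int (List (Int × Int)) :=
  meetings.foldl (fun d m =>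
    match m with
    | [x, y, t] => d.modify t [] (· ++ [(x, y)])
    | _ => d) PySem.Dict.empty

-- meet_list = defaultdict(list); meet_list[x].append(y); meet_list[y].append(x)
def pvAdj (pairs : List (Int × Int)) : PySem.Dict Int (List Int) :=
  pairs.foldl (fun d p => (d.modify p.1 [] (· ++ [p.2])).modify p.2 [] (· ++ [p.1]))
    PySem.Dict.empty

-- start = set(); add the endpoints that already know the secret
def pvStart (pairs : List (Int × Int)) (kn : List Bool) : PySem.Set Int :=
  pairs.foldl (fun s p =>
    let s := if PySem.List.pyGetD kn p.1 false then PySem.Set.add s p.1 else s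
    if PySem.List.pyGetD kn p.2 false then PySem.Set.add s p.2 else s) PySem.Set.empty

-- q = deque(start); while q: pop person, mark-and-enqueue its unmarked neighbours.
-- The Nat argument is fuel (the while loop has no structural measure); the caller passes
-- 2*len(knows) + len(q) + 1, which is proved sufficient on Pre_ inputs below.
def pvBfs (adj : PySem.Dict Int (List Int)) : Nat → List Bool → List Int → List Bool
  | 0, kn, _ => kn
  | _ + 1, kn, [] => kn
  | fuel + 1, kn, p :: q =>
      let st := (adj.getD p []).foldl
        (fun st np =>
          if PySem.List.pyGetD st.1 np false then st
          else (PySem.List.pySetD st.1 np true, st.2 ++ [np])) (kn, q)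
      pvBfs adj fuel st.1 st.2

-- one bucket of A's outer loop
def pvStepA (pairs : List (Int × Int)) (kn : List Bool) : List Bool :=
  pvBfs (pvAdj pairs) (2 * kn.length + (pvStart pairs kn).length + 1) kn (pvStart pairs kn)

def find_all_people (n : Int) (meetings : List (List Int)) (first_person : Int) : List Int :=
  let tm := pvBuckets meetings
  let kn0 := PySem.List.pySetD
    (PySem.List.pySetD (List.replicate n.toNat false) 0 true) first_person true
  let kn := (PySem.List.sorted tm.keys (fun t => t) false).foldl
    (fun kn t => pvStepA (tm.getD t []) kn) kn0
  -- [i for i in range(n) if knows_secret[i]]: knows_secret has exactly n entries, so this is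
  -- the linear scan over its (value, index) pairs (an indexed lookup per i would evaluate
  -- quadratically and is unusable for #eval on large n; the value is the same)
  (kn.zipIdx.filter (fun p => p.1)).map (fun p => (p.2 : Int))

-- ===== PORT B =====
-- sorted({m[2] for m in meetings})
def pvTimes (meetings : List (List Int)) : List Int :=
  PySem.List.sorted (PySem.Set.ofList (meetings.map (fun m => PySem.List.pyGetD m 2 0)))
    (fun t => t) false

-- [(m[0], m[1]) for m in meetings if m[2] == t]
def pvPairsAt (meetings : List (List Int)) (t : Int) : List (Int × Int) :=
  (meetings.filter (fun m => PySem.List.pyGetD m 2 0 == t)).map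
    (fun m => (PySem.List.pyGetD m 0 0, PySem.List.pyGetD m 1 0))

-- one 'for x, y in pairs' pass; the Bool is 'changed'
def pvPass (pairs : List (Int × Int)) (kn : List Bool) : List Bool × Bool :=
  pairs.foldl (fun st p =>
    if PySem.List.pyGetD st.1 p.1 false != PySem.List.pyGetD st.1 p.2 false then
      (PySem.List.pySetD (PySem.List.pySetD st.1 p.1 true) p.2 true, true)
    else st) (kn, false)

-- while changed: run passes.  Fuel len(knows)+1 is always sufficient: every changing
-- pass turns at least one False entry True.
def pvSatur (pairs : List (Int × Int)) : Nat → List Bool → List Bool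
  | 0, kn => kn
  | fuel + 1, kn =>
      let st := pvPass pairs kn
      if st.2 then pvSatur pairs fuel st.1 else st.1

-- one time of B's outer loop
def pvStepB (pairs : List (Int × Int)) (kn : List Bool) : List Bool :=
  pvSatur pairs (kn.length + 1) kn

def find_all_people_alt (n : Int) (meetings : List (List Int)) (first_person : Int) : List Int :=
  let kn0 := PySem.List.pySetD
    (PySem.List.pySetD (List.replicate n.toNat false) 0 true) first_person true
  let kn := (pvTimes meetings).foldl (fun kn t => pvStepB (pvPairsAt meetings t) kn) kn0
  -- [k for k, v in enumerate(knows) if v], built back-to-front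
  kn.zipIdx.foldr (fun p acc => if p.1 then (p.2 : Int) :: acc else acc) []

-- ===== PRECONDITION & SPEC =====
-- Pre_ excludes (a) inputs where A raises (n <= 0; a row whose length is not 3; a person index
-- outside [-n, n), IndexError), and (b) inputs where some time bucket refers to one person under
-- two different indices (v and v-n): there A's neighbour dict, keyed by the raw index, splits that
-- person's meetings across the two aliases, can miss propagation, and its result can even depend
-- on Python's set iteration order — an artefact of A's representation, not a specified value.
def Pre_find_all_people (n : Int) (meetings : List (List Int)) (first_person : Int) : Prop :=
  1 ≤ n ∧ -n ≤ first_person ∧ first_person < n ∧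
    (∀ m ∈ meetings, m.length = 3 ∧ ∀ v ∈ m.take 2, -n ≤ v ∧ v < n) ∧
    (∀ m1 ∈ meetings, ∀ m2 ∈ meetings, m1.getD 2 0 = m2.getD 2 0 →
      ∀ u ∈ m1.take 2, ∀ w ∈ m2.take 2, u % n = w % n → u = w)
instance (n : Int) (meetings : List (List Int)) (first_person : Int) :
    Decidable (Pre_find_all_people n meetings first_person) := by
  unfold Pre_find_all_people; infer_instance

def pvWitness_find_all_people : Int × List (List Int) × Int := (3, [[0, 2, 1], [1, 2, 2]], 1)

def Spec_find_all_people (n : Int) (meetings : List (List Int)) (first_person : Int) (out : List Int) : Prop := out = find_all_people_alt n meetings first_person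
instance (n : Int) (meetings : List (List Int)) (first_person : Int) (out : List Int) : Decidable (Spec_find_all_people n meetings first_person out) := by unfold Spec_find_all_people; infer_instance

-- ===== CLAIM (what is proved, stated in full; the proofs are below) =====
def Claim_equal_find_all_people : Prop := ∀ (n : Int) (meetings : List (List Int)) (first_person : Int), Dom_find_all_people n meetings first_person → Pre_find_all_people n meetings first_person → Spec_find_all_people n meetings first_person (find_all_people n meetings first_person)

-- ===== LEMMAS AND PROOFS =====

-- v is a legal (possibly negative, Python-wrapping) index into a list of length L
def pvInR (L : Nat) (v : Int) : Prop := -(L : Int) ≤ v ∧ v < (L : Int)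

-- the array slot Python's indexing actually reads/writes for v
def pvSlot (L : Nat) (v : Int) : Nat := (if v < 0 then v + (L : Int) else v).toNat

-- all endpoints of a bucket's pair list
def pvPart (E : List (Int × Int)) : List Int := E.flatMap (fun p => [p.1, p.2])

-- a bucket is well-formed: endpoints in range and no slot named by two different raw indices
def pvEOK (E : List (Int × Int)) (L : Nat) : Prop :=
  (∀ v ∈ pvPart E, pvInR L v) ∧
  ∀ u ∈ pvPart E, ∀ w ∈ pvPart E, pvSlot L u = pvSlot L w → u = w

-- who can learn the secret in one bucket: already knows, or meets someone who can learn it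
inductive pvDer (E : List (Int × Int)) (kn : List Bool) : Int → Prop
  | base (v : Int) : pvInR kn.length v → PySem.List.pyGetD kn v false = true → pvDer E kn v
  | fwd {x y : Int} : (x, y) ∈ E → pvDer E kn x → pvDer E kn y
  | bwd {x y : Int} : (x, y) ∈ E → pvDer E kn y → pvDer E kn x

theorem pvGetD_set (l : List Bool) (j i : Nat) (b : Bool) :
    (l.set j b).getD i false = if i = j ∧ j < l.length then b else l.getD i false := by
  simp [List.getD_eq_getElem?_getD, List.getElem?_set]
  split_ifs <;> simp_all

theorem pvCount_set_lt (l : List Bool) (j : Nat) (h : j < l.length) (hf : l.getD j false = false) :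
    (l.set j true).count false + 1 = l.count false := by
  have h1 : l[j] = false := by
    rwa [List.getD_eq_getElem?_getD, List.getElem?_eq_getElem h, Option.getD_some] at hf
  have hs : l.set j true = l.take j ++ true :: l.drop (j+1) := by
    rw [List.set_eq_take_append_cons_drop]; simp [h]
  have hl : l = l.take j ++ l[j] :: l.drop (j+1) := by
    conv_lhs => rw [← List.take_append_drop j l, ← List.getElem_cons_drop (as := l) (i := j) h]
  rw [hs]; conv_rhs => rw [hl]
  simp [List.count_append, h1]; omega

theorem pvCount_set_le (l : List Bool) (j : Nat) : (l.set j true).count false ≤ l.count false := by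
  by_cases h : j < l.length
  · by_cases hf : l.getD j false = false
    · have := pvCount_set_lt l j h hf; omega
    · have hset : l.set j true = l := by
        apply List.ext_getElem (by simp)
        intro i h1 h2
        rw [List.getElem_set]
        split_ifs with hij
        · subst hij
          simp [List.getD_eq_getElem?_getD, List.getElem?_eq_getElem h] at hf
          exact hf.symm
        · rfl
      rw [hset]
  · rw [List.set_eq_of_length_le (by omega)]

theorem pvSlot_natCast (L : Nat) (s : Nat) : pvSlot L (s : Int) = s := by
  unfold pvSlot
  rw [if_neg (by omega)]
  omega

theorem pvSlot_lt (L : Nat) (v : Int) (h : pvInR L v) : pvSlot L v < L := by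
  obtain ⟨h1, h2⟩ := h
  unfold pvSlot
  split_ifs <;> omega

theorem pvInR_natCast (L : Nat) (s : Nat) (h : s < L) : pvInR L (s : Int) := by
  unfold pvInR; omega

theorem pvMarked_lt (kn : List Bool) (s : Nat) (h : kn.getD s false = true) : s < kn.length := by
  by_contra hc
  rw [List.getD_eq_getElem?_getD, List.getElem?_eq_none (by omega)] at h
  simp at h

theorem pvIdx_inr (L : Nat) (v : Int) (h : pvInR L v) :
    PySem.List.pyIdx? L v = some (pvSlot L v) := by
  obtain ⟨h1, h2⟩ := h
  by_cases hv : v < 0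
  · rw [pvSlot, if_pos hv]
    unfold PySem.List.pyIdx?
    rw [if_neg (by omega), if_pos (by omega)]
    congr 1
    omega
  · rw [pvSlot, if_neg hv]
    unfold PySem.List.pyIdx?
    rw [if_pos (by omega), if_pos (by omega)]

theorem pvGetD_inr (kn : List Bool) (v : Int) (h : pvInR kn.length v) :
    PySem.List.pyGetD kn v false = kn.getD (pvSlot kn.length v) false := by
  unfold PySem.List.pyGetD PySem.List.pyGet?
  rw [pvIdx_inr kn.length v h]
  simp [List.getD_eq_getElem?_getD]

theorem pvSetD_inr (kn : List Bool) (v : Int) (b : Bool) (h : pvInR kn.length v) :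
    PySem.List.pySetD kn v b = kn.set (pvSlot kn.length v) b := by
  unfold PySem.List.pySetD PySem.List.pySet?
  rw [pvIdx_inr kn.length v h]
  rfl

theorem pvSlot_cast (L : Nat) (v : Int) (h : pvInR L v) (_hL : 0 < L) :
    ((pvSlot L v : Nat) : Int) = v % (L : Int) := by
  obtain ⟨h1, h2⟩ := h
  unfold pvSlot
  split_ifs with hv
  · rw [Int.toNat_of_nonneg (by omega)]
    have hmod := Int.add_mul_emod_self_left (a := v) (b := (L : Int)) (c := 1)
    simp only [mul_one] at hmod
    rw [← hmod, Int.emod_eq_of_lt (by omega) (by omega)]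
  · rw [Int.toNat_of_nonneg (by omega)]
    exact (Int.emod_eq_of_lt (by omega) (by omega)).symm

theorem pvPart_of_mem (E : List (Int × Int)) (p : Int × Int) (hp : p ∈ E) :
    p.1 ∈ pvPart E ∧ p.2 ∈ pvPart E := by
  unfold pvPart
  constructor <;> exact List.mem_flatMap.mpr ⟨p, hp, by simp⟩

-- ---------- A side: the inner neighbour loop ----------

def pvInner : (List Bool × List Int) → Int → (List Bool × List Int) := fun st np =>
  if PySem.List.pyGetD st.1 np false then st
  else (PySem.List.pySetD st.1 np true, st.2 ++ [np])

theorem pvBfs_cons (adj : PySem.Dict Int (List Int)) (fuel : Nat) (kn : List Bool)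
    (p : Int) (q : List Int) :
    pvBfs adj (fuel + 1) kn (p :: q)
      = pvBfs adj fuel ((adj.getD p []).foldl pvInner (kn, q)).1
          ((adj.getD p []).foldl pvInner (kn, q)).2 := rfl

theorem pvInner_len (nbrs : List Int) : ∀ (kn : List Bool) (q : List Int),
    ((nbrs.foldl pvInner (kn, q)).1).length = kn.length := by
  induction nbrs with
  | nil => intro kn q; rfl
  | cons np rest ih =>
    intro kn q
    simp only [List.foldl_cons, pvInner]
    split_ifs with h
    · exact ih kn q
    · rw [ih]; exact PySem.List.length_pySetD kn np true

theorem pvInner_getD (L : Nat) (nbrs : List Int) : ∀ (kn : List Bool) (q : List Int),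
    kn.length = L → (∀ v ∈ nbrs, pvInR L v) → ∀ s : Nat,
    ((nbrs.foldl pvInner (kn, q)).1).getD s false
      = (kn.getD s false || decide (s ∈ nbrs.map (pvSlot L))) := by
  induction nbrs with
  | nil => intro kn q _ _ s; simp
  | cons np rest ih =>
    intro kn q hlen hnb s
    have hnp := hnb np (by simp)
    have hbr : PySem.List.pyGetD kn np false = kn.getD (pvSlot L np) false := by
      rw [pvGetD_inr kn np (by rw [hlen]; exact hnp), hlen]
    simp only [List.foldl_cons, pvInner]
    rw [hbr]
    split_ifs with h
    · rw [ih kn q hlen (fun v hv => hnb v (by simp [hv])) s]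
      by_cases hs : s = pvSlot L np
      · subst hs; rw [h]; simp
      · simp only [List.map_cons, List.mem_cons, hs, false_or]
    · have hset : PySem.List.pySetD kn np true = kn.set (pvSlot L np) true := by
        rw [pvSetD_inr kn np true (by rw [hlen]; exact hnp), hlen]
      rw [hset]
      rw [ih _ (q ++ [np]) (by simp [hlen]) (fun v hv => hnb v (by simp [hv])) s]
      rw [pvGetD_set]
      by_cases hs : s = pvSlot L np
      · subst hs
        rw [if_pos ⟨rfl, by rw [hlen]; exact pvSlot_lt L np hnp⟩]
        simp
      · rw [if_neg (by intro hc; exact hs hc.1)]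
        simp only [List.map_cons, List.mem_cons, hs, false_or]

theorem pvInner_queue (nbrs : List Int) : ∀ (kn : List Bool) (q : List Int),
    ∃ ext, (nbrs.foldl pvInner (kn, q)).2 = q ++ ext ∧ ∀ v ∈ ext, v ∈ nbrs := by
  induction nbrs with
  | nil => intro kn q; exact ⟨[], by simp⟩
  | cons np rest ih =>
    intro kn q
    simp only [List.foldl_cons, pvInner]
    split_ifs with h
    · obtain ⟨ext, h1, h2⟩ := ih kn q
      exact ⟨ext, h1, fun v hv => by simp [h2 v hv]⟩
    · obtain ⟨ext, h1, h2⟩ := ih (PySem.List.pySetD kn np true) (q ++ [np])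
      refine ⟨np :: ext, by simpa using h1, ?_⟩
      intro v hv
      rcases List.mem_cons.mp hv with rfl | hv'
      · simp
      · simp [h2 v hv']

theorem pvInner_newmark (L : Nat) (nbrs : List Int) : ∀ (kn : List Bool) (q : List Int),
    kn.length = L → (∀ v ∈ nbrs, pvInR L v) → ∀ s : Nat,
    s ∈ nbrs.map (pvSlot L) → kn.getD s false = false →
    ∃ u ∈ (nbrs.foldl pvInner (kn, q)).2, u ∈ nbrs ∧ pvSlot L u = s := by
  induction nbrs with
  | nil => intro kn q _ _ s hs _; simp at hs
  | cons np rest ih =>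
    intro kn q hlen hnb s hs hfalse
    have hnp := hnb np (by simp)
    have hbr : PySem.List.pyGetD kn np false = kn.getD (pvSlot L np) false := by
      rw [pvGetD_inr kn np (by rw [hlen]; exact hnp), hlen]
    simp only [List.foldl_cons, pvInner]
    rw [hbr]
    rw [List.map_cons] at hs
    split_ifs with h
    · rcases List.mem_cons.mp hs with hsnp | hsrest
      · rw [hsnp] at hfalse; rw [h] at hfalse; simp at hfalse
      · obtain ⟨u, hu1, hu2, hu3⟩ := ih kn q hlen (fun v hv => hnb v (by simp [hv])) s
          hsrest hfalse
        exact ⟨u, hu1, by simp [hu2], hu3⟩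
    · have hset : PySem.List.pySetD kn np true = kn.set (pvSlot L np) true := by
        rw [pvSetD_inr kn np true (by rw [hlen]; exact hnp), hlen]
      rw [hset]
      by_cases hsnp : s = pvSlot L np
      · obtain ⟨ext, he1, _⟩ := pvInner_queue rest (kn.set (pvSlot L np) true) (q ++ [np])
        refine ⟨np, ?_, by simp, hsnp.symm⟩
        rw [he1]
        simp
      · have hsrest : s ∈ rest.map (pvSlot L) := by
          rcases List.mem_cons.mp hs with h1 | h1
          · exact absurd h1 hsnp
          · exact h1
        have hfalse' : (kn.set (pvSlot L np) true).getD s false = false := by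
          rw [pvGetD_set, if_neg (by intro hc; exact hsnp hc.1)]
          exact hfalse
        obtain ⟨u, hu1, hu2, hu3⟩ := ih (kn.set (pvSlot L np) true) (q ++ [np])
          (by simp [hlen]) (fun v hv => hnb v (by simp [hv])) s hsrest hfalse'
        exact ⟨u, hu1, by simp [hu2], hu3⟩

theorem pvInner_mu (L : Nat) (nbrs : List Int) : ∀ (kn : List Bool) (q : List Int),
    kn.length = L → (∀ v ∈ nbrs, pvInR L v) →
    2 * ((nbrs.foldl pvInner (kn, q)).1).count false + ((nbrs.foldl pvInner (kn, q)).2).length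
      ≤ 2 * kn.count false + q.length := by
  induction nbrs with
  | nil => intro kn q _ _; simp
  | cons np rest ih =>
    intro kn q hlen hnb
    have hnp := hnb np (by simp)
    have hbr : PySem.List.pyGetD kn np false = kn.getD (pvSlot L np) false := by
      rw [pvGetD_inr kn np (by rw [hlen]; exact hnp), hlen]
    simp only [List.foldl_cons, pvInner]
    rw [hbr]
    split_ifs with h
    · exact ih kn q hlen (fun w hw => hnb w (by simp [hw]))
    · have hset : PySem.List.pySetD kn np true = kn.set (pvSlot L np) true := by
        rw [pvSetD_inr kn np true (by rw [hlen]; exact hnp), hlen]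
      rw [hset]
      have hmu := ih (kn.set (pvSlot L np) true) (q ++ [np]) (by simp [hlen])
        (fun w hw => hnb w (by simp [hw]))
      have hcnt : (kn.set (pvSlot L np) true).count false + 1 = kn.count false :=
        pvCount_set_lt kn (pvSlot L np) (by rw [hlen]; exact pvSlot_lt L np hnp)
          (by simpa using h)
      simp only [List.length_append, List.length_cons, List.length_nil] at hmu ⊢
      omega

-- ---------- A side: BFS ----------

def pvInv (L : Nat) (adj : PySem.Dict Int (List Int)) (kn : List Bool) (q : List Int) : Prop :=
  ∀ s : Nat, kn.getD s false = true →
    ((∃ v ∈ q, pvSlot L v = s) ∨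
      ∀ v : Int, pvInR L v → pvSlot L v = s →
        ∀ w ∈ adj.getD v [], kn.getD (pvSlot L w) false = true)

theorem pvBfs_len (adj : PySem.Dict Int (List Int)) :
    ∀ (f : Nat) (kn : List Bool) (q : List Int), (pvBfs adj f kn q).length = kn.length := by
  intro f
  induction f with
  | zero => intro kn q; rfl
  | succ f ih =>
    intro kn q
    cases q with
    | nil => rfl
    | cons p q => rw [pvBfs_cons, ih, pvInner_len]

theorem pvAdj_mem (E : List (Int × Int)) (v w : Int) :
    w ∈ (pvAdj E).getD v [] ↔ (v, w) ∈ E ∨ (w, v) ∈ E := by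
  suffices h : ∀ d : PySem.Dict Int (List Int),
      w ∈ (E.foldl (fun d p => (d.modify p.1 [] (· ++ [p.2])).modify p.2 [] (· ++ [p.1])) d).getD v []
        ↔ w ∈ d.getD v [] ∨ (v, w) ∈ E ∨ (w, v) ∈ E by
    have := h PySem.Dict.empty
    simpa [PySem.Dict.getD_empty] using this
  induction E with
  | nil => intro d; simp
  | cons p E ih =>
    intro d
    obtain ⟨a, b⟩ := p
    simp only [List.foldl_cons]
    rw [ih]
    simp only [PySem.Dict.getD_modify, List.mem_cons, Prod.mk.injEq]
    split_ifs <;> simp_all [List.mem_append] <;> tauto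

theorem pvStart_mem (E : List (Int × Int)) (kn : List Bool) (v : Int) :
    v ∈ pvStart E kn
      ↔ (∃ w, (v, w) ∈ E ∨ (w, v) ∈ E) ∧ PySem.List.pyGetD kn v false = true := by
  suffices h : ∀ s : PySem.Set Int,
      v ∈ E.foldl (fun s p =>
        let s := if PySem.List.pyGetD kn p.1 false then PySem.Set.add s p.1 else s
        if PySem.List.pyGetD kn p.2 false then PySem.Set.add s p.2 else s) s
        ↔ v ∈ s ∨ ((∃ w, (v, w) ∈ E ∨ (w, v) ∈ E) ∧ PySem.List.pyGetD kn v false = true) by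
    have := h PySem.Set.empty
    simpa [PySem.Set.empty] using this
  induction E with
  | nil => intro s; simp
  | cons p E ih =>
    intro s
    obtain ⟨a, b⟩ := p
    have hs' : ∀ s : PySem.Set Int,
        (v ∈ (if PySem.List.pyGetD kn b false = true
          then (if PySem.List.pyGetD kn a false = true then s.add a else s).add b
          else (if PySem.List.pyGetD kn a false = true then s.add a else s))
        ↔ v ∈ s ∨ (v = a ∧ PySem.List.pyGetD kn a false = true)
            ∨ (v = b ∧ PySem.List.pyGetD kn b false = true)) := by
      intro s
      split_ifs with h1 h2 h2 <;> simp_all [PySem.Set.mem_add]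
      tauto
    simp only [List.foldl_cons]
    rw [ih, hs']
    constructor
    · rintro ((hv | ⟨rfl, hc⟩ | ⟨rfl, hc⟩) | ⟨⟨w, hw⟩, hm⟩)
      · exact Or.inl hv
      · exact Or.inr ⟨⟨b, Or.inl (by simp)⟩, hc⟩
      · exact Or.inr ⟨⟨a, Or.inr (by simp)⟩, hc⟩
      · refine Or.inr ⟨⟨w, ?_⟩, hm⟩
        rcases hw with hw | hw
        · exact Or.inl (List.mem_cons_of_mem _ hw)
        · exact Or.inr (List.mem_cons_of_mem _ hw)
    · rintro (hv | ⟨⟨w, hw | hw⟩, hm⟩)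
      · exact Or.inl (Or.inl hv)
      · rcases List.mem_cons.mp hw with hw1 | hw1
        · obtain ⟨rfl, rfl⟩ := Prod.mk.injEq .. ▸ (by simpa using hw1 : v = a ∧ w = b)
          exact Or.inl (Or.inr (Or.inl ⟨rfl, hm⟩))
        · exact Or.inr ⟨⟨w, Or.inl hw1⟩, hm⟩
      · rcases List.mem_cons.mp hw with hw1 | hw1
        · obtain ⟨rfl, rfl⟩ := Prod.mk.injEq .. ▸ (by simpa using hw1 : w = a ∧ v = b)
          exact Or.inl (Or.inr (Or.inr ⟨rfl, hm⟩))
        · exact Or.inr ⟨⟨w, Or.inr hw1⟩, hm⟩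

theorem pvAdj_inr (E : List (Int × Int)) (L : Nat) (hEOK : pvEOK E L) :
    ∀ p w, w ∈ (pvAdj E).getD p [] → pvInR L w ∧ w ∈ pvPart E ∧ p ∈ pvPart E := by
  intro p w hw
  rcases (pvAdj_mem E p w).mp hw with h | h
  · have hpp := pvPart_of_mem E _ h
    exact ⟨hEOK.1 w hpp.2, hpp.2, hpp.1⟩
  · have hpp := pvPart_of_mem E _ h
    exact ⟨hEOK.1 w hpp.1, hpp.1, hpp.2⟩

theorem pvBfs_mono (E : List (Int × Int)) (L : Nat) (hEOK : pvEOK E L) :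
    ∀ (f : Nat) (kn : List Bool) (q : List Int), kn.length = L →
      ∀ s : Nat, kn.getD s false = true → (pvBfs (pvAdj E) f kn q).getD s false = true := by
  intro f
  induction f with
  | zero => intro kn q _ s h; exact h
  | succ f ih =>
    intro kn q hlen s h
    cases q with
    | nil => exact h
    | cons p q =>
      rw [pvBfs_cons]
      have hnb : ∀ v ∈ (pvAdj E).getD p [], pvInR L v :=
        fun v hv => (pvAdj_inr E L hEOK p v hv).1
      apply ih _ _ (by rw [pvInner_len]; exact hlen)
      rw [pvInner_getD L _ _ _ hlen hnb, h]
      simp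

theorem pvBfs_sound (E : List (Int × Int)) (L : Nat) (P : Int → Prop) (hEOK : pvEOK E L)
    (hP : ∀ v w, P v → w ∈ (pvAdj E).getD v [] → P w) :
    ∀ (f : Nat) (kn : List Bool) (q : List Int), kn.length = L →
      (∀ v ∈ q, P v ∧ v ∈ pvPart E) →
      (∀ s : Nat, kn.getD s false = true →
        (∃ v, pvInR L v ∧ pvSlot L v = s ∧ P v) ∧ (∀ u ∈ pvPart E, pvSlot L u = s → P u)) →
      ∀ s : Nat, (pvBfs (pvAdj E) f kn q).getD s false = true →
        ∃ v, pvInR L v ∧ pvSlot L v = s ∧ P v := by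
  intro f
  induction f with
  | zero => intro kn q _ _ hm s h; exact (hm s h).1
  | succ f ih =>
    intro kn q hlen hq hm s h
    cases q with
    | nil => exact (hm s h).1
    | cons p q =>
      rw [pvBfs_cons] at h
      have hnb : ∀ v ∈ (pvAdj E).getD p [], pvInR L v :=
        fun v hv => (pvAdj_inr E L hEOK p v hv).1
      obtain ⟨hPp, _⟩ := hq p (by simp)
      refine ih _ _ (by rw [pvInner_len]; exact hlen) ?_ ?_ s h
      · intro v hv
        obtain ⟨ext, he1, he2⟩ := pvInner_queue ((pvAdj E).getD p []) kn q
        rw [he1] at hv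
        rcases List.mem_append.mp hv with hv1 | hv1
        · exact hq v (by simp [hv1])
        · have hvnb := he2 v hv1
          exact ⟨hP p v hPp hvnb, (pvAdj_inr E L hEOK p v hvnb).2.1⟩
      · intro t ht
        rw [pvInner_getD L _ _ _ hlen hnb] at ht
        rcases Bool.or_eq_true_iff.mp ht with ht1 | ht1
        · exact hm t ht1
        · obtain ⟨np, hnpmem, hnps⟩ := List.mem_map.mp (by simpa using ht1)
          have hPnp : P np := hP p np hPp hnpmem
          have hnpInR : pvInR L np := hnb np hnpmem
          have hnpPart : np ∈ pvPart E := (pvAdj_inr E L hEOK p np hnpmem).2.1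
          constructor
          · exact ⟨np, hnpInR, hnps, hPnp⟩
          · intro u hu hus
            by_cases hold : kn.getD t false = true
            · exact (hm t hold).2 u hu hus
            · have : u = np := hEOK.2 u hu np hnpPart (by rw [hus, hnps])
              rw [this]
              exact hPnp

theorem pvBfs_closed (E : List (Int × Int)) (L : Nat) (hEOK : pvEOK E L) :
    ∀ (f : Nat) (kn : List Bool) (q : List Int), kn.length = L →
      2 * kn.count false + q.length < f → (∀ v ∈ q, v ∈ pvPart E) →
      pvInv L (pvAdj E) kn q →
      pvInv L (pvAdj E) (pvBfs (pvAdj E) f kn q) [] := by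
  intro f
  induction f with
  | zero => intro kn q _ hf _ _; omega
  | succ f ih =>
    intro kn q hlen hf hqp hInv
    cases q with
    | nil => exact fun s hs => (hInv s hs).imp_left (by simp)
    | cons p q =>
      rw [pvBfs_cons]
      have hnb : ∀ v ∈ (pvAdj E).getD p [], pvInR L v :=
        fun v hv => (pvAdj_inr E L hEOK p v hv).1
      have hmu := pvInner_mu L ((pvAdj E).getD p []) kn q hlen hnb
      obtain ⟨ext, he1, he2⟩ := pvInner_queue ((pvAdj E).getD p []) kn q
      refine ih _ _ (by rw [pvInner_len]; exact hlen) (by simp at hf ⊢; omega) ?_ ?_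
      · intro v hv
        rw [he1] at hv
        rcases List.mem_append.mp hv with hv1 | hv1
        · exact hqp v (by simp [hv1])
        · exact (pvAdj_inr E L hEOK p v (he2 v hv1)).2.1
      · intro s hs
        by_cases hold : kn.getD s false = true
        · rcases hInv s hold with ⟨v, hvq, hvs⟩ | hcl
          · rcases List.mem_cons.mp hvq with rfl | hvq'
            · right
              intro u hu hus w hw
              have hupart : u ∈ pvPart E := (pvAdj_inr E L hEOK u w hw).2.2
              have hppart : v ∈ pvPart E := hqp v (by simp)
              have huv : u = v := hEOK.2 u hupart v hppart (by rw [hus, hvs])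
              subst huv
              rw [pvInner_getD L _ _ _ hlen hnb]
              have : pvSlot L w ∈ ((pvAdj E).getD u []).map (pvSlot L) :=
                List.mem_map.mpr ⟨w, hw, rfl⟩
              simp [this]
            · left
              refine ⟨v, ?_, hvs⟩
              rw [he1]
              exact List.mem_append.mpr (Or.inl hvq')
          · right
            intro u hu hus w hw
            rw [pvInner_getD L _ _ _ hlen hnb, hcl u hu hus w hw]
            simp
        · rw [pvInner_getD L _ _ _ hlen hnb] at hs
          rcases Bool.or_eq_true_iff.mp hs with h1 | h1
          · exact absurd h1 hold
          · obtain ⟨u, hu1, hu2, hu3⟩ := pvInner_newmark L _ kn q hlen hnb s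
              (by simpa using h1) (by simpa using Bool.eq_false_iff.mpr hold)
            exact Or.inl ⟨u, hu1, hu3⟩

theorem stepA_char (E : List (Int × Int)) (kn : List Bool) (hEOK : pvEOK E kn.length) :
    ∀ s : Nat, ((pvStepA E kn).getD s false = true
      ↔ ∃ v, pvInR kn.length v ∧ pvSlot kn.length v = s ∧ pvDer E kn v) := by
  have hq0 : ∀ v ∈ pvStart E kn, pvDer E kn v ∧ v ∈ pvPart E := by
    intro v hv
    obtain ⟨⟨w, hw⟩, hm⟩ := (pvStart_mem E kn v).mp hv
    have hpart : v ∈ pvPart E := by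
      rcases hw with h | h
      · exact (pvPart_of_mem E _ h).1
      · exact (pvPart_of_mem E _ h).2
    exact ⟨pvDer.base v (hEOK.1 v hpart) hm, hpart⟩
  have hm0 : ∀ s : Nat, kn.getD s false = true →
      (∃ v, pvInR kn.length v ∧ pvSlot kn.length v = s ∧ pvDer E kn v) ∧
      (∀ u ∈ pvPart E, pvSlot kn.length u = s → pvDer E kn u) := by
    intro s hs
    have hslt := pvMarked_lt kn s hs
    constructor
    · refine ⟨(s : Int), pvInR_natCast _ s hslt, pvSlot_natCast _ s, ?_⟩
      exact pvDer.base _ (pvInR_natCast _ s hslt)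
        (by rw [PySem.List.pyGetD_natCast]; exact hs)
    · intro u hu hus
      refine pvDer.base u (hEOK.1 u hu) ?_
      rw [pvGetD_inr kn u (hEOK.1 u hu), hus]
      exact hs
  have hclosed : pvInv kn.length (pvAdj E) (pvStepA E kn) [] := by
    apply pvBfs_closed E kn.length hEOK _ kn (pvStart E kn) rfl
    · have := List.count_le_length (l := kn) (a := false)
      omega
    · intro v hv; exact (hq0 v hv).2
    · intro s hs
      by_cases hex : ∃ v, pvInR kn.length v ∧ pvSlot kn.length v = s ∧
          ∃ w, w ∈ (pvAdj E).getD v []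
      · obtain ⟨v, hvInR, hvs, w, hw⟩ := hex
        left
        have hvpart : v ∈ pvPart E := (pvAdj_inr E kn.length hEOK v w hw).2.2
        refine ⟨v, ?_, hvs⟩
        apply (pvStart_mem E kn v).mpr
        constructor
        · rcases (pvAdj_mem E v w).mp hw with h | h
          · exact ⟨w, Or.inl h⟩
          · exact ⟨w, Or.inr h⟩
        · rw [pvGetD_inr kn v hvInR, hvs]
          exact hs
      · right
        intro v hv hvs w hw
        exact absurd ⟨v, hv, hvs, w, hw⟩ hex
  have aux : ∀ v, pvDer E kn v → (pvStepA E kn).getD (pvSlot kn.length v) false = true := by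
    intro v hd
    induction hd with
    | base v hv0 hm =>
      apply pvBfs_mono E kn.length hEOK _ kn (pvStart E kn) rfl
      rw [← pvGetD_inr kn v hv0]
      exact hm
    | @fwd x y hxy _ ihx =>
      have hxpart := (pvPart_of_mem E _ hxy).1
      have hypart := (pvPart_of_mem E _ hxy).2
      rcases hclosed (pvSlot kn.length x) ihx with ⟨v, hv, _⟩ | hcl
      · exact absurd hv (by simp)
      · exact hcl x (hEOK.1 x hxpart) rfl y ((pvAdj_mem E x y).mpr (Or.inl hxy))
    | @bwd x y hxy _ ihy =>
      have hxpart := (pvPart_of_mem E _ hxy).1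
      have hypart := (pvPart_of_mem E _ hxy).2
      rcases hclosed (pvSlot kn.length y) ihy with ⟨v, hv, _⟩ | hcl
      · exact absurd hv (by simp)
      · exact hcl y (hEOK.1 y hypart) rfl x ((pvAdj_mem E y x).mpr (Or.inr hxy))
  intro s
  constructor
  · intro h
    exact pvBfs_sound E kn.length (pvDer E kn) hEOK
      (fun v w hv hw => by
        rcases (pvAdj_mem E v w).mp hw with h1 | h1
        · exact pvDer.fwd h1 hv
        · exact pvDer.bwd h1 hv)
      _ kn (pvStart E kn) rfl hq0 hm0 s h
  · rintro ⟨v, hvInR, hvs, hd⟩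
    rw [← hvs]
    exact aux v hd

theorem len_stepA (E : List (Int × Int)) (kn : List Bool) :
    (pvStepA E kn).length = kn.length := by
  unfold pvStepA; rw [pvBfs_len]

-- ---------- B side: saturation passes ----------

def pvPassF : (List Bool × Bool) → (Int × Int) → (List Bool × Bool) := fun st p =>
  if PySem.List.pyGetD st.1 p.1 false != PySem.List.pyGetD st.1 p.2 false then
    (PySem.List.pySetD (PySem.List.pySetD st.1 p.1 true) p.2 true, true)
  else st

theorem pvPass_eq (E : List (Int × Int)) (kn : List Bool) :
    pvPass E kn = E.foldl pvPassF (kn, false) := rfl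

theorem pvPassF_len (E : List (Int × Int)) :
    ∀ (kn : List Bool) (c : Bool), ((E.foldl pvPassF (kn, c)).1).length = kn.length := by
  induction E with
  | nil => intro kn c; rfl
  | cons p E ih =>
    intro kn c
    simp only [List.foldl_cons, pvPassF]
    split_ifs with h
    · rw [ih]
      rw [PySem.List.length_pySetD, PySem.List.length_pySetD]
    · exact ih kn c

theorem pvPassF_fire (L : Nat) (kn : List Bool) (x y : Int)
    (hlen : kn.length = L) (hx : pvInR L x) (hy : pvInR L y) :
    PySem.List.pySetD (PySem.List.pySetD kn x true) y true
      = (kn.set (pvSlot L x) true).set (pvSlot L y) true := by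
  rw [pvSetD_inr kn x true (by rw [hlen]; exact hx)]
  rw [pvSetD_inr _ y true (by simpa [hlen] using hy)]
  simp [hlen]

theorem pvEOK_sub (E0 E : List (Int × Int)) (L : Nat) (hEOK : pvEOK E0 L)
    (hsub : ∀ p ∈ E, p ∈ E0) : ∀ p ∈ E, pvInR L p.1 ∧ pvInR L p.2 := by
  intro p hp
  have h0 := hsub p hp
  exact ⟨hEOK.1 p.1 (pvPart_of_mem E0 p h0).1, hEOK.1 p.2 (pvPart_of_mem E0 p h0).2⟩

theorem pvPassF_mono (E0 : List (Int × Int)) (L : Nat) (hEOK : pvEOK E0 L) :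
    ∀ (E : List (Int × Int)) (kn : List Bool) (c : Bool), (∀ p ∈ E, p ∈ E0) →
      kn.length = L →
      ∀ s : Nat, kn.getD s false = true → ((E.foldl pvPassF (kn, c)).1).getD s false = true := by
  intro E
  induction E with
  | nil => intro kn c _ _ s h; exact h
  | cons p E ih =>
    intro kn c hsub hlen s h
    obtain ⟨hx, hy⟩ := pvEOK_sub E0 (p :: E) L hEOK hsub p (by simp)
    simp only [List.foldl_cons, pvPassF]
    split_ifs with hf
    · apply ih _ _ (fun q hq => hsub q (by simp [hq]))
        (by rw [pvPassF_fire L _ _ _ hlen hx hy]; simp [hlen])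
      rw [pvPassF_fire L _ _ _ hlen hx hy, pvGetD_set, pvGetD_set]
      split_ifs <;> simp_all
    · exact ih _ _ (fun q hq => hsub q (by simp [hq])) hlen s h

theorem pvPassF_sound (E0 : List (Int × Int)) (L : Nat) (P : Int → Prop) (hEOK : pvEOK E0 L)
    (hPE : ∀ p ∈ E0, (P p.1 ↔ P p.2)) :
    ∀ (E : List (Int × Int)) (kn : List Bool) (c : Bool), (∀ p ∈ E, p ∈ E0) →
      kn.length = L →
      (∀ s : Nat, kn.getD s false = true →
        (∃ v, pvInR L v ∧ pvSlot L v = s ∧ P v) ∧ (∀ u ∈ pvPart E0, pvSlot L u = s → P u)) →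
      ∀ s : Nat, ((E.foldl pvPassF (kn, c)).1).getD s false = true →
        (∃ v, pvInR L v ∧ pvSlot L v = s ∧ P v) ∧ (∀ u ∈ pvPart E0, pvSlot L u = s → P u) := by
  intro E
  induction E with
  | nil => intro kn c _ _ hm s h; exact hm s h
  | cons p E ih =>
    intro kn c hsub hlen hm s h
    have hp0 := hsub p (by simp)
    obtain ⟨hx, hy⟩ := pvEOK_sub E0 (p :: E) L hEOK hsub p (by simp)
    have hxpart := (pvPart_of_mem E0 p hp0).1
    have hypart := (pvPart_of_mem E0 p hp0).2
    simp only [List.foldl_cons, pvPassF] at h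
    split_ifs at h with hf
    · have hone : P p.1 ∧ P p.2 := by
        rw [pvGetD_inr kn p.1 (hlen ▸ hx), pvGetD_inr kn p.2 (hlen ▸ hy), hlen] at hf
        rcases Bool.eq_false_or_eq_true (kn.getD (pvSlot L p.1) false) with h1 | h1
        · have hp1 : P p.1 := (hm _ h1).2 p.1 hxpart rfl
          exact ⟨hp1, (hPE p hp0).mp hp1⟩
        · have h2 : kn.getD (pvSlot L p.2) false = true := by
            rcases Bool.eq_false_or_eq_true (kn.getD (pvSlot L p.2) false) with h2 | h2
            · exact h2
            · rw [h1, h2] at hf; simp at hf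
          have hp2 : P p.2 := (hm _ h2).2 p.2 hypart rfl
          exact ⟨(hPE p hp0).mpr hp2, hp2⟩
      refine ih _ _ (fun q hq => hsub q (by simp [hq]))
        (by rw [pvPassF_fire L _ _ _ hlen hx hy]; simp [hlen]) ?_ s h
      intro t ht
      rw [pvPassF_fire L _ _ _ hlen hx hy, pvGetD_set, pvGetD_set] at ht
      by_cases hty : t = pvSlot L p.2 ∧ pvSlot L p.2 < (kn.set (pvSlot L p.1) true).length
      · obtain ⟨rfl, _⟩ := hty
        constructor
        · exact ⟨p.2, hy, rfl, hone.2⟩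
        · intro u hu hus
          by_cases hold : kn.getD (pvSlot L p.2) false = true
          · exact (hm _ hold).2 u hu hus
          · rw [hEOK.2 u hu p.2 hypart hus]
            exact hone.2
      · rw [if_neg hty] at ht
        by_cases htx : t = pvSlot L p.1 ∧ pvSlot L p.1 < kn.length
        · obtain ⟨rfl, _⟩ := htx
          constructor
          · exact ⟨p.1, hx, rfl, hone.1⟩
          · intro u hu hus
            by_cases hold : kn.getD (pvSlot L p.1) false = true
            · exact (hm _ hold).2 u hu hus
            · rw [hEOK.2 u hu p.1 hxpart hus]
              exact hone.1
        · rw [if_neg htx] at ht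
          exact hm t ht
    · exact ih _ _ (fun q hq => hsub q (by simp [hq])) hlen hm s h

theorem pvPassF_chTrue (E : List (Int × Int)) :
    ∀ (kn : List Bool), (E.foldl pvPassF (kn, true)).2 = true := by
  induction E with
  | nil => intro kn; rfl
  | cons p E ih =>
    intro kn
    simp only [List.foldl_cons, pvPassF]
    split_ifs with h
    · exact ih _
    · exact ih kn

theorem pvPassF_false (E : List (Int × Int)) :
    ∀ (kn : List Bool), (E.foldl pvPassF (kn, false)).2 = false →
      (E.foldl pvPassF (kn, false)).1 = kn ∧
      ∀ p ∈ E, PySem.List.pyGetD kn p.1 false = PySem.List.pyGetD kn p.2 false := by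
  induction E with
  | nil => intro kn _; exact ⟨rfl, by simp⟩
  | cons p E ih =>
    intro kn h
    simp only [List.foldl_cons, pvPassF] at h ⊢
    split_ifs at h ⊢ with hf
    · rw [pvPassF_chTrue] at h; simp at h
    · have heq : PySem.List.pyGetD kn p.1 false = PySem.List.pyGetD kn p.2 false := by
        simpa using hf
      obtain ⟨h1, h2⟩ := ih kn h
      refine ⟨h1, ?_⟩
      intro q hq
      rcases List.mem_cons.mp hq with rfl | hq'
      · exact heq
      · exact h2 q hq'

theorem pvPassF_dec (E0 : List (Int × Int)) (L : Nat) (hEOK : pvEOK E0 L) :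
    ∀ (E : List (Int × Int)) (kn : List Bool) (c : Bool), (∀ p ∈ E, p ∈ E0) →
      kn.length = L →
      ((E.foldl pvPassF (kn, c)).1).count false ≤ kn.count false ∧
      (c = false → (E.foldl pvPassF (kn, c)).2 = true →
        ((E.foldl pvPassF (kn, c)).1).count false < kn.count false) := by
  intro E
  induction E with
  | nil =>
    intro kn c _ _
    exact ⟨le_refl _, by
      intro hc h
      simp only [List.foldl_nil] at h
      rw [hc] at h
      simp at h⟩
  | cons p E ih =>
    intro kn c hsub hlen
    obtain ⟨hx, hy⟩ := pvEOK_sub E0 (p :: E) L hEOK hsub p (by simp)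
    simp only [List.foldl_cons, pvPassF]
    split_ifs with hf
    · have hlt : ((kn.set (pvSlot L p.1) true).set (pvSlot L p.2) true).count false
          < kn.count false := by
        rw [pvGetD_inr kn p.1 (hlen ▸ hx), pvGetD_inr kn p.2 (hlen ▸ hy), hlen] at hf
        rcases Bool.eq_false_or_eq_true (kn.getD (pvSlot L p.1) false) with h1 | h1
        · have h2 : kn.getD (pvSlot L p.2) false = false := by
            rcases Bool.eq_false_or_eq_true (kn.getD (pvSlot L p.2) false) with h2 | h2
            · rw [h1, h2] at hf; simp at hf
            · exact h2
          have hne : pvSlot L p.1 ≠ pvSlot L p.2 := by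
            intro hc; rw [hc] at h1; rw [h1] at h2; simp at h2
          have h2' : (kn.set (pvSlot L p.1) true).getD (pvSlot L p.2) false = false := by
            rw [pvGetD_set, if_neg (fun hcon => hne hcon.1.symm)]
            exact h2
          have hc1 := pvCount_set_lt (kn.set (pvSlot L p.1) true) (pvSlot L p.2)
            (by simpa [hlen] using pvSlot_lt L p.2 hy) h2'
          have hc2 := pvCount_set_le kn (pvSlot L p.1)
          omega
        · have hc1 := pvCount_set_lt kn (pvSlot L p.1)
            (by rw [hlen]; exact pvSlot_lt L p.1 hx) h1
          have hc2 := pvCount_set_le (kn.set (pvSlot L p.1) true) (pvSlot L p.2)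
          omega
      have hIH := ih ((kn.set (pvSlot L p.1) true).set (pvSlot L p.2) true) true
        (fun q hq => hsub q (by simp [hq])) (by simp [hlen])
      rw [pvPassF_fire L _ _ _ hlen hx hy]
      exact ⟨le_trans hIH.1 (le_of_lt hlt), fun _ _ => lt_of_le_of_lt hIH.1 hlt⟩
    · exact ih kn c (fun q hq => hsub q (by simp [hq])) hlen

theorem pvSatur_len (E : List (Int × Int)) :
    ∀ (f : Nat) (kn : List Bool), (pvSatur E f kn).length = kn.length := by
  intro f
  induction f with
  | zero => intro kn; rfl
  | succ f ih =>
    intro kn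
    show (if (pvPass E kn).2 then pvSatur E f (pvPass E kn).1 else (pvPass E kn).1).length
      = kn.length
    rcases Bool.eq_false_or_eq_true (pvPass E kn).2 with hc | hc <;>
      simp only [hc, Bool.false_eq_true, if_true, if_false]
    · rw [ih, pvPass_eq, pvPassF_len]
    · rw [pvPass_eq, pvPassF_len]

theorem pvSatur_mono (E : List (Int × Int)) (L : Nat) (hEOK : pvEOK E L) :
    ∀ (f : Nat) (kn : List Bool), kn.length = L →
      ∀ s : Nat, kn.getD s false = true → (pvSatur E f kn).getD s false = true := by
  intro f
  induction f with
  | zero => intro kn _ s h; exact h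
  | succ f ih =>
    intro kn hlen s h
    show (if (pvPass E kn).2 then pvSatur E f (pvPass E kn).1 else (pvPass E kn).1).getD s false
      = true
    rcases Bool.eq_false_or_eq_true (pvPass E kn).2 with hc | hc <;>
      simp only [hc, Bool.false_eq_true, if_true, if_false]
    · refine ih _ (by rw [pvPass_eq, pvPassF_len]; exact hlen) s ?_
      rw [pvPass_eq]
      exact pvPassF_mono E L hEOK E kn false (fun p hp => hp) hlen s h
    · rw [pvPass_eq]
      exact pvPassF_mono E L hEOK E kn false (fun p hp => hp) hlen s h

theorem pvSatur_sound (E : List (Int × Int)) (L : Nat) (P : Int → Prop) (hEOK : pvEOK E L)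
    (hPE : ∀ p ∈ E, (P p.1 ↔ P p.2)) :
    ∀ (f : Nat) (kn : List Bool), kn.length = L →
      (∀ s : Nat, kn.getD s false = true →
        (∃ v, pvInR L v ∧ pvSlot L v = s ∧ P v) ∧ (∀ u ∈ pvPart E, pvSlot L u = s → P u)) →
      ∀ s : Nat, (pvSatur E f kn).getD s false = true →
        ∃ v, pvInR L v ∧ pvSlot L v = s ∧ P v := by
  intro f
  induction f with
  | zero => intro kn _ hm s h; exact (hm s h).1
  | succ f ih =>
    intro kn hlen hm s h
    rw [show pvSatur E (f + 1) kn
        = (if (pvPass E kn).2 then pvSatur E f (pvPass E kn).1 else (pvPass E kn).1) from rfl]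
      at h
    rcases Bool.eq_false_or_eq_true (pvPass E kn).2 with hc | hc <;>
      rw [hc] at h <;> simp only [Bool.false_eq_true, if_true, if_false] at h
    · refine ih _ (by rw [pvPass_eq, pvPassF_len]; exact hlen) ?_ s h
      intro t ht
      rw [pvPass_eq] at ht
      exact pvPassF_sound E L P hEOK hPE E kn false (fun p hp => hp) hlen hm t ht
    · rw [pvPass_eq] at h
      exact (pvPassF_sound E L P hEOK hPE E kn false (fun p hp => hp) hlen hm s h).1

theorem pvSatur_closed (E : List (Int × Int)) (L : Nat) (hEOK : pvEOK E L) :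
    ∀ (f : Nat) (kn : List Bool), kn.length = L → kn.count false < f →
      ∀ p ∈ E, PySem.List.pyGetD (pvSatur E f kn) p.1 false
        = PySem.List.pyGetD (pvSatur E f kn) p.2 false := by
  intro f
  induction f with
  | zero => intro kn _ hf; omega
  | succ f ih =>
    intro kn hlen hf p hp
    rw [show pvSatur E (f + 1) kn
        = (if (pvPass E kn).2 then pvSatur E f (pvPass E kn).1 else (pvPass E kn).1) from rfl]
    rcases Bool.eq_false_or_eq_true (pvPass E kn).2 with hc | hc <;>
      rw [hc] <;> simp only [Bool.false_eq_true, if_true, if_false]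
    · have hdec := pvPassF_dec E L hEOK E kn false (fun q hq => hq) hlen
      have hlt : ((pvPass E kn).1).count false < kn.count false := by
        rw [pvPass_eq] at hc ⊢
        exact hdec.2 rfl hc
      exact ih _ (by rw [pvPass_eq, pvPassF_len]; exact hlen) (by omega) p hp
    · rw [pvPass_eq] at hc ⊢
      obtain ⟨h1, h2⟩ := pvPassF_false E kn hc
      rw [h1]
      exact h2 p hp

theorem len_stepB (E : List (Int × Int)) (kn : List Bool) :
    (pvStepB E kn).length = kn.length := by
  unfold pvStepB
  rw [pvSatur_len]

theorem stepB_char (E : List (Int × Int)) (kn : List Bool) (hEOK : pvEOK E kn.length) :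
    ∀ s : Nat, ((pvStepB E kn).getD s false = true
      ↔ ∃ v, pvInR kn.length v ∧ pvSlot kn.length v = s ∧ pvDer E kn v) := by
  have hPE : ∀ p ∈ E, (pvDer E kn p.1 ↔ pvDer E kn p.2) := by
    intro p hp
    constructor
    · intro h; exact pvDer.fwd (x := p.1) (y := p.2) hp h
    · intro h; exact pvDer.bwd (x := p.1) (y := p.2) hp h
  have hm0 : ∀ s : Nat, kn.getD s false = true →
      (∃ v, pvInR kn.length v ∧ pvSlot kn.length v = s ∧ pvDer E kn v) ∧
      (∀ u ∈ pvPart E, pvSlot kn.length u = s → pvDer E kn u) := by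
    intro s hs
    have hslt := pvMarked_lt kn s hs
    constructor
    · exact ⟨(s : Int), pvInR_natCast _ s hslt, pvSlot_natCast _ s,
        pvDer.base _ (pvInR_natCast _ s hslt) (by rw [PySem.List.pyGetD_natCast]; exact hs)⟩
    · intro u hu hus
      refine pvDer.base u (hEOK.1 u hu) ?_
      rw [pvGetD_inr kn u (hEOK.1 u hu), hus]
      exact hs
  have hcl : ∀ p ∈ E, PySem.List.pyGetD (pvStepB E kn) p.1 false
      = PySem.List.pyGetD (pvStepB E kn) p.2 false := by
    apply pvSatur_closed E kn.length hEOK _ kn rfl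
    have := List.count_le_length (l := kn) (a := false)
    omega
  have hlenB := len_stepB E kn
  have aux : ∀ v, pvDer E kn v → (pvStepB E kn).getD (pvSlot kn.length v) false = true := by
    intro v hd
    induction hd with
    | base v hv0 hm =>
      apply pvSatur_mono E kn.length hEOK _ kn rfl
      rw [← pvGetD_inr kn v hv0]
      exact hm
    | @fwd x y hxy _ ihx =>
      have hxInR := hEOK.1 x (pvPart_of_mem E _ hxy).1
      have hyInR := hEOK.1 y (pvPart_of_mem E _ hxy).2
      have := hcl (x, y) hxy
      rw [pvGetD_inr _ x (hlenB ▸ hxInR), pvGetD_inr _ y (hlenB ▸ hyInR), hlenB] at this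
      rw [← this]
      exact ihx
    | @bwd x y hxy _ ihy =>
      have hxInR := hEOK.1 x (pvPart_of_mem E _ hxy).1
      have hyInR := hEOK.1 y (pvPart_of_mem E _ hxy).2
      have := hcl (x, y) hxy
      rw [pvGetD_inr _ x (hlenB ▸ hxInR), pvGetD_inr _ y (hlenB ▸ hyInR), hlenB] at this
      rw [this]
      exact ihy
  intro s
  constructor
  · intro h
    exact pvSatur_sound E kn.length (pvDer E kn) hEOK hPE _ kn rfl hm0 s h
  · rintro ⟨v, hvInR, hvs, hd⟩
    rw [← hvs]
    exact aux v hd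

theorem stepA_eq_stepB (E : List (Int × Int)) (kn : List Bool)
    (hEOK : pvEOK E kn.length) : pvStepA E kn = pvStepB E kn := by
  have hlA := len_stepA E kn
  have hlB := len_stepB E kn
  apply List.ext_getElem (by rw [hlA, hlB])
  intro i h1 h2
  have hA := stepA_char E kn hEOK i
  have hB := stepB_char E kn hEOK i
  have e1 : (pvStepA E kn)[i] = (pvStepA E kn).getD i false :=
    (List.getD_eq_getElem _ _ h1).symm
  have e2 : (pvStepB E kn)[i] = (pvStepB E kn).getD i false :=
    (List.getD_eq_getElem _ _ h2).symm
  rw [e1, e2]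
  by_cases hd : ∃ v, pvInR kn.length v ∧ pvSlot kn.length v = i ∧ pvDer E kn v
  · rw [hA.mpr hd, hB.mpr hd]
  · have hA1 : (pvStepA E kn).getD i false = false := by
      rcases Bool.eq_false_or_eq_true ((pvStepA E kn).getD i false) with h | h
      · exact absurd (hA.mp h) hd
      · exact h
    have hB1 : (pvStepB E kn).getD i false = false := by
      rcases Bool.eq_false_or_eq_true ((pvStepB E kn).getD i false) with h | h
      · exact absurd (hB.mp h) hd
      · exact h
    rw [hA1, hB1]

-- ---------- bridging A's dict bucketing to B's filter-per-time ----------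

-- on length-3 rows, A's bucket fold is the generic modify-append fold over (t, (x, y)) pairs
theorem pvBuckets_rep (meetings : List (List Int)) (h3 : ∀ m ∈ meetings, m.length = 3) :
    pvBuckets meetings
      = (meetings.map (fun m =>
            (PySem.List.pyGetD m 2 0, (PySem.List.pyGetD m 0 0, PySem.List.pyGetD m 1 0)))).foldl
          (fun d p => d.modify p.1 [] (· ++ [p.2])) PySem.Dict.empty := by
  unfold pvBuckets
  suffices h : ∀ d : PySem.Dict Int (List (Int × Int)),
      meetings.foldl (fun d m =>
        match m with
        | [x, y, t] => d.modify t [] (· ++ [(x, y)])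
        | _ => d) d
      = (meetings.map (fun m =>
            (PySem.List.pyGetD m 2 0, (PySem.List.pyGetD m 0 0, PySem.List.pyGetD m 1 0)))).foldl
          (fun d p => d.modify p.1 [] (· ++ [p.2])) d from h _
  induction meetings with
  | nil => intro d; rfl
  | cons m ms ih =>
    intro d
    obtain ⟨x, y, t, rfl⟩ := List.length_eq_three.mp (h3 m (by simp))
    simp only [List.foldl_cons, List.map_cons]
    exact ih (fun m hm => h3 m (by simp [hm])) _

-- [k for k, v in enumerate(knows) if v] back-to-front = filter-then-map
theorem pvOut_foldr (l : List (Bool × Nat)) :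
    l.foldr (fun p acc => if p.1 then (p.2 : Int) :: acc else acc) []
      = (l.filter (fun p => p.1)).map (fun p => (p.2 : Int)) := by
  induction l with
  | nil => rfl
  | cons p l ih =>
    rcases Bool.eq_false_or_eq_true p.1 with h | h <;>
      simp [h, ih]

-- ===== VERDICT (by name: the statement is the Claim_ definition above) =====
theorem find_all_people_spec : Claim_equal_find_all_people := by
  intro n meetings first_person _hdom hpre
  obtain ⟨hn, hfp1, hfp2, hm, hal⟩ := hpre
  have h3 : ∀ m ∈ meetings, m.length = 3 := fun m hm' => (hm m hm').1
  set kn0 := PySem.List.pySetD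
    (PySem.List.pySetD (List.replicate n.toNat false) 0 true) first_person true with hkn0
  show ((((PySem.List.sorted (pvBuckets meetings).keys (fun t => t) false).foldl
        (fun kn t => pvStepA ((pvBuckets meetings).getD t []) kn) kn0).zipIdx.filter
          (fun p => p.1)).map (fun p => (p.2 : Int)))
    = ((pvTimes meetings).foldl
        (fun kn t => pvStepB (pvPairsAt meetings t) kn) kn0).zipIdx.foldr
        (fun p acc => if p.1 then (p.2 : Int) :: acc else acc) []
  rw [pvOut_foldr]
  have hrep := pvBuckets_rep meetings h3
  have hkeys : (pvBuckets meetings).keys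
      = PySem.Set.ofList (meetings.map (fun m => PySem.List.pyGetD m 2 0)) := by
    rw [hrep, PySem.Dict.keys_foldl_modify_key _ Prod.fst [] (fun _ p => (· ++ [p.2]))]
    rw [PySem.Dict.keys_empty, PySem.Set.update_nil_left, List.map_map]
    rfl
  have hgetD : ∀ t : Int, (pvBuckets meetings).getD t [] = pvPairsAt meetings t := by
    intro t
    rw [hrep, PySem.Dict.getD_foldl_modify_append, PySem.Dict.getD_empty]
    unfold pvPairsAt
    rw [List.filter_map, List.map_map]
    rfl
  have hsorted : PySem.List.sorted (pvBuckets meetings).keys (fun t => t) false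
      = pvTimes meetings := by
    rw [hkeys]; rfl
  rw [hsorted]
  have hcongr : List.foldl (fun kn t => pvStepA ((pvBuckets meetings).getD t []) kn) kn0
        (pvTimes meetings)
      = List.foldl (fun kn t => pvStepA (pvPairsAt meetings t) kn) kn0 (pvTimes meetings) :=
    PySem.List.foldl_congr_mem (l := pvTimes meetings)
      (fun kn t => pvStepA ((pvBuckets meetings).getD t []) kn)
      (fun kn t => pvStepA (pvPairsAt meetings t) kn) kn0
      (fun acc t _ => by simp only [hgetD t])
  rw [hcongr]
  have hlen0 : kn0.length = n.toNat := by
    simp [hkn0, PySem.List.length_pySetD]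
  have hcastn : ((n.toNat : Int)) = n := Int.toNat_of_nonneg (by omega)
  have hEOK : ∀ t : Int, pvEOK (pvPairsAt meetings t) n.toNat := by
    intro t
    have hpart : ∀ v ∈ pvPart (pvPairsAt meetings t),
        ∃ mm ∈ meetings, v ∈ mm.take 2 ∧ mm.getD 2 0 = t := by
      intro v hv
      obtain ⟨p, hp, hv2⟩ := List.mem_flatMap.mp hv
      obtain ⟨m, hmf, rfl⟩ := List.mem_map.mp hp
      have hmm := List.mem_filter.mp hmf
      obtain ⟨x, y, tt, rfl⟩ := List.length_eq_three.mp (h3 m hmm.1)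
      have ht : tt = t := by
        have := hmm.2
        rw [show PySem.List.pyGetD [x, y, tt] 2 0 = tt from rfl] at this
        exact eq_of_beq this
      have hpv : (PySem.List.pyGetD [x, y, tt] 0 0, PySem.List.pyGetD [x, y, tt] 1 0)
          = (x, y) := rfl
      rw [hpv] at hv2
      rcases (by simpa using hv2 : v = x ∨ v = y) with rfl | rfl
      · exact ⟨[v, y, tt], hmm.1, by simp, by simp [ht]⟩
      · exact ⟨[x, v, tt], hmm.1, by simp, by simp [ht]⟩
    constructor
    · intro v hv
      obtain ⟨mm, hmmem, hvt, _⟩ := hpart v hv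
      have hb := (hm mm hmmem).2 v hvt
      unfold pvInR
      omega
    · intro u hu w hw hslot
      obtain ⟨m1, hm1, hu2, ht1⟩ := hpart u hu
      obtain ⟨m2, hm2, hw2, ht2⟩ := hpart w hw
      have huInR : pvInR n.toNat u := by
        have := (hm m1 hm1).2 u hu2; unfold pvInR; omega
      have hwInR' : pvInR n.toNat w := by
        have := (hm m2 hm2).2 w hw2; unfold pvInR; omega
      apply hal m1 hm1 m2 hm2 (by rw [ht1, ht2]) u hu2 w hw2
      have hcu := pvSlot_cast n.toNat u huInR (by omega)
      have hcw := pvSlot_cast n.toNat w hwInR' (by omega)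
      rw [hcastn] at hcu hcw
      rw [← hcu, ← hcw, hslot]
  have hfold : ∀ (ts : List Int) (kn : List Bool), kn.length = n.toNat →
      ts.foldl (fun kn t => pvStepA (pvPairsAt meetings t) kn) kn
        = ts.foldl (fun kn t => pvStepB (pvPairsAt meetings t) kn) kn := by
    intro ts
    induction ts with
    | nil => intro kn _; rfl
    | cons t ts ih =>
      intro kn hkl
      have hE : pvEOK (pvPairsAt meetings t) kn.length := by
        rw [hkl]; exact hEOK t
      simp only [List.foldl_cons]
      rw [stepA_eq_stepB _ _ hE, ih _ (by rw [← stepA_eq_stepB _ _ hE, len_stepA, hkl])]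
  rw [← hfold _ kn0 hlen0]
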